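-- pv_equiv track=rewrite | github.com/nazndev/Multilingual_DailyDialog | src/05_build_sft.py | _build_history_before_target
-- ===== SOURCE A (Python) =====
-- def _text_or_empty(value) -> str:
--     return value.strip() if isinstance(value, str) else ""
--
-- def _build_history_before_target(
--     target_turns: list[str],
--     target_index: int,
--     context_window: int,
-- ) -> tuple[list[dict[str, str]], str | None]:
--     """
--     Build chronological chat history immediately before the assistant target turn.
--
--     DailyDialog-style layout: even indices = user, odd = assistant. The **target**
--     is always an assistant turn at odd ``target_index``. Only prior indices
--     ``0 .. target_index - 1`` are included.
--
--     If ``context_window > 0``, only the **last** ``context_window`` utterances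
--     before the target are kept (same chronological order).
--
--     Returns (history_messages, skip_reason): skip_reason is set if this example
--     must be dropped (empty slot inside the selected window, or empty history).
--     """
--     n = len(target_turns)
--     if context_window <= 0:
--         start = 0
--     else:
--         start = max(0, target_index - context_window)
--
--     history_messages: list[dict[str, str]] = []
--     for j in range(start, target_index):
--         if j >= n:
--             return [], "context_hole"
--         target_text = _text_or_empty(target_turns[j])
--         if not target_text:
--             return [], "context_hole"
--         role = "user" if j % 2 == 0 else "assistant"
--         history_messages.append({"role": role, "content": target_text})
--
--     if not history_messages:
--         return [], "empty_history"
--     return history_messages, None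
-- ===== SOURCE B (Python) =====
-- def _build_history_before_target(
--     target_turns: list[str],
--     target_index: int,
--     context_window: int,
-- ) -> tuple[list[dict[str, str]], str | None]:
--     start = 0 if context_window <= 0 else max(0, target_index - context_window)
--     # Walk BACKWARD from the turn just before the target down to start,
--     # collecting messages newest-first, then reverse once at the end.
--     # A hole anywhere yields the same ([], "context_hole"), so order is immaterial.
--     rev: list[dict[str, str]] = []
--     j = target_index - 1
--     while j >= start:
--         if j >= len(target_turns):
--             return [], "context_hole"
--         text = target_turns[j].strip()
--         if not text:
--             return [], "context_hole"
--         rev.append(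
--             {"role": "user" if j % 2 == 0 else "assistant", "content": text}
--         )
--         j -= 1
--     if not rev:
--         return [], "empty_history"
--     rev.reverse()
--     return rev, None
-- ===== Notes on version B (the rewrite author's own statement) =====
-- stated objective: alternative
-- what changed: B traverses the window in the opposite (backward) direction with a decrementing while-loop, building the history newest-first and reversing once at the end, instead of A's forward for-loop over range(start, target_index) appending in chronological order; correct because a hole anywhere yields the same ([], 'context_hole') regardless of which index detects it.
import Mathlib
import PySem

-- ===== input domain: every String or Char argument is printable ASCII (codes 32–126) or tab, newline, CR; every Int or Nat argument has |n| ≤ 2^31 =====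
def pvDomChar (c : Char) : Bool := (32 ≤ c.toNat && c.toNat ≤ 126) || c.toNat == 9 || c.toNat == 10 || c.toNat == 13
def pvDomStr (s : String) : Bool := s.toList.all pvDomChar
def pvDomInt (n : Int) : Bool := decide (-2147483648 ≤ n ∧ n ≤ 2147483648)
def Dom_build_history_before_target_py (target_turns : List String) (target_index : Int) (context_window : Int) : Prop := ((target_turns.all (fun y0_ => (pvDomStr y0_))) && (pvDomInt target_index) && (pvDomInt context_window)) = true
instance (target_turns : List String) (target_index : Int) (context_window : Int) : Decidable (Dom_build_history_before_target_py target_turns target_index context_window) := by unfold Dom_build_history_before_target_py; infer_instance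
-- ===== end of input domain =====

-- B traverses the window backward (newest-first) with a decrementing loop and one final
-- reverse, instead of A's forward range loop; objective: alternative (same cost).

-- ===== PORT A =====
-- _text_or_empty: on the stated domain every element is a str, so it is .strip()
def textOrEmpty_py (s : String) : String := PySem.Str.strip s

-- the for-loop of A, over the list of indices range(start, target_index)
def bhLoopA (turns : List String) (n : Int) (js : List Int)
    (acc : List (List (String × String))) : (List (List (String × String))) × Option String :=
  match js with
  | [] => if acc.isEmpty then ([], some "empty_history") else (acc, none)
  | j :: rest =>
    if n ≤ j then ([], some "context_hole")
    else
      -- turns[j]: guarded by j < n (and j ≥ 0 from the range start), so pyGetD is exact here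
      let t := textOrEmpty_py (PySem.List.pyGetD turns j "")
      if t == "" then ([], some "context_hole")
      else bhLoopA turns n rest
        (acc ++ [[("role", if PySem.Int.mod j 2 = 0 then "user" else "assistant"), ("content", t)]])

def build_history_before_target_py (target_turns : List String) (target_index : Int) (context_window : Int) : (List (List (String × String))) × Option String :=
  let n : Int := target_turns.length
  let start : Int := if context_window ≤ 0 then 0 else max 0 (target_index - context_window)
  bhLoopA target_turns n (PySem.List.pyRange start target_index 1) []

-- ===== PORT B =====
def mkMsgB (j : Int) (t : String) : List (String × String) :=
  [("role", if PySem.Int.mod j 2 = 0 then "user" else "assistant"),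
   ("content", t)]

-- B's backward while-loop: j runs from target_index-1 down to start, appending to rev;
-- 'none' signals the context_hole early return.
def backLoopB (turns : List String) (start : Int) (j : Int)
    (rev : List (List (String × String))) : Option (List (List (String × String))) :=
  if _h : start ≤ j then
    if (turns.length : Int) ≤ j then none
    else
      -- turns[j]: guarded by start ≤ j (start ≥ 0) and j < len, so pyGetD is exact here
      let t := PySem.Str.strip (PySem.List.pyGetD turns j "")
      if t == "" then none
      else backLoopB turns start (j - 1) (rev ++ [mkMsgB j t])
  else some rev
termination_by (j + 1 - start).toNat
decreasing_by omega

def build_history_before_target_py_alt (target_turns : List String) (target_index : Int) (context_window : Int) : (List (List (String × String))) × Option String :=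
  let start : Int := if context_window ≤ 0 then 0 else max 0 (target_index - context_window)
  match backLoopB target_turns start (target_index - 1) [] with
  | none => ([], some "context_hole")
  | some rev => if rev.isEmpty then ([], some "empty_history") else (rev.reverse, none)

-- ===== PRECONDITION & SPEC =====
def Spec_build_history_before_target_py (target_turns : List String) (target_index : Int) (context_window : Int) (out : (List (List (String × String))) × Option String) : Prop := out = build_history_before_target_py_alt target_turns target_index context_window
instance (target_turns : List String) (target_index : Int) (context_window : Int) (out : (List (List (String × String))) × Option String) : Decidable (Spec_build_history_before_target_py target_turns target_index context_window out) := by unfold Spec_build_history_before_target_py; infer_instance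

-- ===== CLAIM (what is proved, stated in full; the proofs are below) =====
def Claim_equal_build_history_before_target_py : Prop := ∀ (target_turns : List String) (target_index : Int) (context_window : Int), Dom_build_history_before_target_py target_turns target_index context_window → Spec_build_history_before_target_py target_turns target_index context_window (build_history_before_target_py target_turns target_index context_window)

-- ===== LEMMAS AND PROOFS =====

-- slice xs[a:b] uncons at an in-range start (proof helper)
lemma pv_slice_cons (xs : List String) (a b : Int) (h0 : 0 ≤ a)
    (hlen : a < (xs.length : Int)) (hab : a < b) :
    PySem.List.slice xs (some a) (some b) =
      xs.getD a.toNat "" :: PySem.List.slice xs (some (a + 1)) (some b) := by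
  rw [PySem.List.slice_toNat xs h0 (by omega), PySem.List.slice_toNat xs (by omega) (by omega)]
  have ha : a.toNat < xs.length := by omega
  have h1 : (a + 1).toNat = a.toNat + 1 := by omega
  have h2 : b.toNat - a.toNat = (b.toNat - (a + 1).toNat) + 1 := by omega
  rw [List.drop_eq_getElem_cons ha, h2, List.take_succ_cons, List.getD_eq_getElem xs "" ha, h1]

-- slice xs[a:a+k+1] snoc at an in-range end (proof helper)
lemma pv_slice_snoc (xs : List String) (a : Int) (k : Nat) (h0 : 0 ≤ a)
    (hlen : a + (k : Int) < (xs.length : Int)) :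
    PySem.List.slice xs (some a) (some (a + (k : Int) + 1)) =
      PySem.List.slice xs (some a) (some (a + (k : Int))) ++ [xs.getD (a + (k : Int)).toNat ""] := by
  rw [PySem.List.slice_toNat xs h0 (by omega), PySem.List.slice_toNat xs h0 (by omega)]
  have h1 : (a + (k : Int) + 1).toNat - a.toNat = ((a + (k : Int)).toNat - a.toNat) + 1 := by omega
  have h2 : (a + (k : Int)).toNat - a.toNat = k := by omega
  have hk : k < (xs.drop a.toNat).length := by
    rw [List.length_drop]; omega
  rw [h1, h2, List.take_add_one, List.getElem?_eq_getElem hk]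
  have hg : (xs.drop a.toNat)[k] = xs.getD (a + (k : Int)).toNat "" := by
    rw [List.getElem_drop, List.getD_eq_getElem xs "" (by omega)]
    congr 1; omega
  simp [hg]

-- closed form for A's loop over range(start, start+k)
lemma pv_bhLoopA_eq (turns : List String) (k : Nat) :
    ∀ (start : Int) (acc : List (List (String × String))), 0 ≤ start →
    bhLoopA turns (turns.length : Int) (PySem.List.pyRange start (start + (k : Int)) 1) acc =
      (if (k ≠ 0 ∧ (turns.length : Int) < start + (k : Int)) ∨
          ((PySem.List.slice turns (some start) (some (start + (k : Int)))).any
            (fun t => PySem.Str.strip t == "")) = true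
       then ([], some "context_hole")
       else
         let msgs := (PySem.List.enumerate
            (PySem.List.slice turns (some start) (some (start + (k : Int)))) start).map
            (fun p => mkMsgB p.1 (PySem.Str.strip p.2))
         if (acc ++ msgs).isEmpty then ([], some "empty_history") else (acc ++ msgs, none)) := by
  induction k with
  | zero =>
    intro start acc h0
    rw [show start + ((0 : Nat) : Int) = start by simp]
    rw [PySem.List.pyRange_one_eq_nil le_rfl, PySem.List.slice_toNat turns h0 h0]
    simp [bhLoopA, PySem.List.enumerate_nil]
  | succ k ih =>
    intro start acc h0
    have hlt : start < start + ((k + 1 : Nat) : Int) := by push_cast; omega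
    rw [PySem.List.pyRange_one_cons hlt]
    by_cases hn : (turns.length : Int) ≤ start
    · rw [if_pos (Or.inl ⟨Nat.succ_ne_zero k, by push_cast; omega⟩)]
      simp only [bhLoopA]
      rw [if_pos hn]
    · push Not at hn
      have hsl := pv_slice_cons turns start (start + ((k + 1 : Nat) : Int)) h0 hn hlt
      have hget : PySem.List.pyGetD turns start "" = turns.getD start.toNat "" :=
        PySem.List.pyGetD_of_nonneg turns "" h0
      by_cases ht : (PySem.Str.strip (turns.getD start.toNat "") == "") = true
      · rw [if_pos (Or.inr (by rw [hsl, List.any_cons, ht, Bool.true_or]))]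
        simp only [bhLoopA]
        rw [if_neg (by omega), hget]
        simp only [textOrEmpty_py, ht, if_pos]
      · -- head nonempty: loop recurses; use ih at start+1
        have hshift : start + ((k + 1 : Nat) : Int) = (start + 1) + (k : Int) := by
          push_cast; ring
        conv_lhs => rw [hshift]
        simp only [bhLoopA]
        rw [if_neg (by omega), hget]
        simp only [textOrEmpty_py]
        rw [if_neg ht]
        rw [ih (start + 1) _ (by omega)]
        rw [hsl, hshift]
        simp only [List.any_cons, ht, Bool.false_or, PySem.List.enumerate_cons, List.map_cons]
        have hcond : ((k ≠ 0 ∧ (turns.length : Int) < start + 1 + (k : Int)) ∨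
              ((PySem.List.slice turns (some (start + 1)) (some (start + 1 + (k : Int)))).any
                (fun t => PySem.Str.strip t == "")) = true) ↔
            ((k + 1 ≠ 0 ∧ (turns.length : Int) < start + 1 + (k : Int)) ∨
              ((PySem.List.slice turns (some (start + 1)) (some (start + 1 + (k : Int)))).any
                (fun t => PySem.Str.strip t == "")) = true) := by
          constructor
          · rintro (⟨_, h⟩ | h)
            · exact Or.inl ⟨by omega, h⟩
            · exact Or.inr h
          · rintro (⟨_, h⟩ | h)
            · rcases Nat.eq_zero_or_pos k with hk0 | hk0
              · subst hk0
                exfalso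
                rw [show start + 1 + ((0 : Nat) : Int) = start + 1 by simp] at h
                omega
              · exact Or.inl ⟨by omega, h⟩
            · exact Or.inr h
        rw [if_congr hcond rfl rfl]
        rcases Decidable.em ((k + 1 ≠ 0 ∧ (turns.length : Int) < start + 1 + (k : Int)) ∨
              ((PySem.List.slice turns (some (start + 1)) (some (start + 1 + (k : Int)))).any
                (fun t => PySem.Str.strip t == "")) = true) with hc | hc
        · rw [if_pos hc, if_pos hc]
        · rw [if_neg hc, if_neg hc]
          simp [mkMsgB]

-- closed form for B's backward loop ending at j = start + k - 1
lemma pv_backLoopB_eq (turns : List String) (k : Nat) :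
    ∀ (start : Int) (rev : List (List (String × String))), 0 ≤ start →
    backLoopB turns start (start + (k : Int) - 1) rev =
      (if (k ≠ 0 ∧ (turns.length : Int) < start + (k : Int)) ∨
          ((PySem.List.slice turns (some start) (some (start + (k : Int)))).any
            (fun t => PySem.Str.strip t == "")) = true
       then none
       else some (rev ++ ((PySem.List.enumerate
            (PySem.List.slice turns (some start) (some (start + (k : Int)))) start).map
            (fun p => mkMsgB p.1 (PySem.Str.strip p.2))).reverse)) := by
  induction k with
  | zero =>
    intro start rev h0
    rw [show start + ((0 : Nat) : Int) = start by simp]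
    rw [PySem.List.slice_toNat turns h0 h0]
    unfold backLoopB
    rw [dif_neg (by omega)]
    simp [PySem.List.enumerate_nil]
  | succ k ih =>
    intro start rev h0
    have hj : start + ((k + 1 : Nat) : Int) - 1 = start + (k : Int) := by push_cast; ring
    rw [hj]
    unfold backLoopB
    rw [dif_pos (by omega)]
    by_cases hn : (turns.length : Int) ≤ start + (k : Int)
    · rw [if_pos hn, if_pos (Or.inl ⟨Nat.succ_ne_zero k, by push_cast; omega⟩)]
    · push Not at hn
      rw [if_neg (by omega)]
      have hsnoc : PySem.List.slice turns (some start) (some (start + ((k + 1 : Nat) : Int))) =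
          PySem.List.slice turns (some start) (some (start + (k : Int))) ++
            [turns.getD (start + (k : Int)).toNat ""] := by
        rw [show start + ((k + 1 : Nat) : Int) = start + (k : Int) + 1 by push_cast; ring]
        exact pv_slice_snoc turns start k h0 hn
      have hget : PySem.List.pyGetD turns (start + (k : Int)) "" =
          turns.getD (start + (k : Int)).toNat "" :=
        PySem.List.pyGetD_of_nonneg turns "" (by omega)
      rw [hget]
      by_cases ht : (PySem.Str.strip (turns.getD (start + (k : Int)).toNat "") == "") = true
      · rw [if_pos ht, if_pos (Or.inr (by rw [hsnoc, List.any_append, List.any_cons, List.any_nil, Bool.or_false, ht, Bool.or_true]))]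
      · rw [if_neg ht]
        rw [show start + (k : Int) = start + (k : Int) - 1 + 1 by ring]
        rw [show start + (k : Int) - 1 + 1 - 1 = start + (k : Int) - 1 by ring]
        rw [ih start _ h0]
        have hlenpart : ¬ ((turns.length : Int) < start + (k : Int)) := by omega
        have hlenpart' : ¬ ((turns.length : Int) < start + ((k + 1 : Nat) : Int)) := by
          push_cast; omega
        have hcond : ((k ≠ 0 ∧ (turns.length : Int) < start + (k : Int)) ∨
              ((PySem.List.slice turns (some start) (some (start + (k : Int)))).any
                (fun t => PySem.Str.strip t == "")) = true) ↔
            ((k + 1 ≠ 0 ∧ (turns.length : Int) < start + ((k + 1 : Nat) : Int)) ∨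
              ((PySem.List.slice turns (some start) (some (start + ((k + 1 : Nat) : Int)))).any
                (fun t => PySem.Str.strip t == "")) = true) := by
          rw [hsnoc, List.any_append, List.any_cons]
          simp only [ht]
          constructor
          · rintro (⟨_, h⟩ | h)
            · exact absurd h hlenpart
            · exact Or.inr (by simp [h])
          · rintro (⟨_, h⟩ | h)
            · exact absurd h hlenpart'
            · simp only [List.any_nil, Bool.or_false] at h
              exact Or.inr h
        rcases Decidable.em ((k ≠ 0 ∧ (turns.length : Int) < start + (k : Int)) ∨
              ((PySem.List.slice turns (some start) (some (start + (k : Int)))).any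
                (fun t => PySem.Str.strip t == "")) = true) with hc | hc
        · rw [if_pos hc, if_pos (hcond.mp hc)]
        · rw [if_neg hc, if_neg (fun h => hc (hcond.mpr h))]
          rw [hsnoc, PySem.List.enumerate_append]
          have hlen : (PySem.List.slice turns (some start) (some (start + (k : Int)))).length = k := by
            rw [PySem.List.slice_toNat turns h0 (by omega)]
            rw [List.length_take, List.length_drop]
            omega
        -- start + length of the k-slice = start + k, enumerating the snoc element at index start+k
          rw [hlen, PySem.List.enumerate_cons, PySem.List.enumerate_nil]
          rw [show start + (k : Int) - 1 + 1 = start + (k : Int) by ring]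
          simp [mkMsgB]

-- ===== VERDICT (by name: the statement is the Claim_ definition above) =====
theorem build_history_before_target_py_spec : Claim_equal_build_history_before_target_py := by
  intro turns ti cw _
  unfold Spec_build_history_before_target_py build_history_before_target_py build_history_before_target_py_alt
  simp only []
  set start : Int := if cw ≤ 0 then 0 else max 0 (ti - cw) with hstart
  have h0 : 0 ≤ start := by
    rw [hstart]; split
    · exact le_refl 0
    · exact le_max_left 0 (ti - cw)
  by_cases hts : ti ≤ start
  · rw [PySem.List.pyRange_one_eq_nil hts]
    have hB : backLoopB turns start (ti - 1) [] = some [] := by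
      unfold backLoopB
      rw [dif_neg (by omega)]
    rw [hB]
    simp [bhLoopA]
  · push Not at hts
    have hk : ti = start + (((ti - start).toNat : Nat) : Int) := by omega
    have hkne : (ti - start).toNat ≠ 0 := by omega
    conv_lhs => rw [hk]
    rw [pv_bhLoopA_eq turns (ti - start).toNat start [] h0]
    have hj : ti - 1 = start + (((ti - start).toNat : Nat) : Int) - 1 := by omega
    rw [hj, pv_backLoopB_eq turns (ti - start).toNat start [] h0, ← hk]
    by_cases hc : (((ti - start).toNat ≠ 0 ∧ (turns.length : Int) < ti) ∨
        ((PySem.List.slice turns (some start) (some ti)).any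
          (fun t => PySem.Str.strip t == "")) = true)
    · rw [if_pos hc, if_pos hc]
    · rw [if_neg hc, if_neg hc]
      have hn : start < (turns.length : Int) := by
        push Not at hc
        omega
      simp only [List.nil_append]
      rw [if_neg ?_, if_neg ?_]
      · rw [List.reverse_reverse]
      · rw [pv_slice_cons turns start ti h0 hn hts, PySem.List.enumerate_cons, List.map_cons]
        simp
      · rw [pv_slice_cons turns start ti h0 hn hts, PySem.List.enumerate_cons, List.map_cons]
        simp
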